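-- pv_equiv track=rewrite | github.com/Abe-Borg/Psychrometrics-App | backend/app/engine/tmy_processor.py | _extract_month
-- ===== SOURCE A (Python) =====
-- def _extract_month(row: list[str], hour_index: int) -> int:
--     """Extract month from TMY3 row or compute from hour index."""
--     # Try to parse date from first column (format varies: MM/DD/YYYY or YYYY-MM-DD)
--     try:
--         date_str = row[0].strip()
--         if "/" in date_str:
--             parts = date_str.split("/")
--             return int(parts[0])
--         elif "-" in date_str:
--             parts = date_str.split("-")
--             return int(parts[1])
--     except (ValueError, IndexError):
--         pass
--
--     # Fallback: compute from hour index (0-8759)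
--     days_per_month = [31, 28, 31, 30, 31, 30, 31, 31, 30, 31, 30, 31]
--     hours_per_month = [d * 24 for d in days_per_month]
--     cumulative = 0
--     for m, h in enumerate(hours_per_month):
--         cumulative += h
--         if hour_index < cumulative:
--             return m + 1
--     return 12
-- ===== SOURCE B (Python) =====
-- import bisect
-- from itertools import accumulate
--
-- _CUM_HOURS = list(accumulate(d * 24 for d in
--                              [31, 28, 31, 30, 31, 30, 31, 31, 30, 31, 30, 31]))
--
--
-- def _parse_month(cell):
--     """Month from a date cell ('MM/DD/YYYY' or 'YYYY-MM-DD'), None if unparseable."""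
--     s = cell.strip()
--     if "/" in s:
--         head = s.split("/")[0]
--     elif "-" in s:
--         head = s.split("-")[1]
--     else:
--         return None
--     try:
--         return int(head)
--     except ValueError:
--         return None
--
--
-- def _extract_month(row: list[str], hour_index: int) -> int:
--     m = _parse_month(row[0]) if row else None
--     if m is not None:
--         return m
--     return min(bisect.bisect_right(_CUM_HOURS, hour_index) + 1, 12)
-- ===== Notes on version B (the rewrite author's own statement) =====
-- stated objective: idiomatic
-- what changed: The date-parse branch becomes an Option-returning helper, and the fallback's linear cumulative-sum scan over the 12 months is replaced by a precomputed cumulative-hours table queried with one bisect_right binary search clamped to 12.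
import Mathlib
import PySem

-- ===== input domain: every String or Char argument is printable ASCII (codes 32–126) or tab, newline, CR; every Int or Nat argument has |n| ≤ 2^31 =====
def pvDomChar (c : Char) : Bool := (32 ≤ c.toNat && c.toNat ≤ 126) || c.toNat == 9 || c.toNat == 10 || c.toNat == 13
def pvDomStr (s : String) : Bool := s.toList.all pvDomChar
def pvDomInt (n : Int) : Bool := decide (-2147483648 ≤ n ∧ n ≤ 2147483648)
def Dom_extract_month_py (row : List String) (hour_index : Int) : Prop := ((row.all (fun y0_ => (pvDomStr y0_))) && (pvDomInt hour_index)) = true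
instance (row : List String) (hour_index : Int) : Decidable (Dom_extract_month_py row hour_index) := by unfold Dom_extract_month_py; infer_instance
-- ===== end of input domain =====

-- B replaces A's linear cumulative-sum scan of the fallback with a precomputed
-- cumulative-hours table and a single bisect_right binary search (objective: idiomatic).

-- ===== PORT A =====
-- A's fallback loop: 'cumulative += h; if hour_index < cumulative: return m + 1' over
-- hours_per_month, with enumerate counter m; returns 12 if the loop finishes.
def pvALoop (hour_index : Int) : List Int → Int → Nat → Int
  | [], _, _ => 12
  | h :: t, cumulative, m =>
    if hour_index < cumulative + h then (m : Int) + 1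
    else pvALoop hour_index t (cumulative + h) (m + 1)

def pvAFallback (hour_index : Int) : Int :=
  let days_per_month : List Int := [31, 28, 31, 30, 31, 30, 31, 31, 30, 31, 30, 31]
  let hours_per_month := days_per_month.map (fun d => d * 24)
  pvALoop hour_index hours_per_month 0 0

def extract_month_py (row : List String) (hour_index : Int) : Int :=
  match row with
  | [] => pvAFallback hour_index          -- row[0] raises IndexError, caught → fallback
  | cell :: _ =>
    let date_str := PySem.Str.strip cell
    if PySem.Str.isIn "/" date_str then
      let parts := (PySem.Str.split? date_str "/").getD []   -- sep ≠ "", split? is some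
      match PySem.List.pyGet? parts 0 with
      | none => pvAFallback hour_index    -- IndexError caught → fallback (unreachable)
      | some p =>
        match PySem.Int.ofStr? p with
        | none => pvAFallback hour_index  -- ValueError caught → fallback
        | some v => v
    else if PySem.Str.isIn "-" date_str then
      let parts := (PySem.Str.split? date_str "-").getD []
      match PySem.List.pyGet? parts 1 with
      | none => pvAFallback hour_index    -- IndexError caught → fallback
      | some p =>
        match PySem.Int.ofStr? p with
        | none => pvAFallback hour_index  -- ValueError caught → fallback
        | some v => v
    else pvAFallback hour_index

-- ===== PORT B =====
-- precomputed list(accumulate(d*24 for d in days_per_month))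
def pvCumHours : List Int := [744, 1416, 2160, 2880, 3624, 4344, 5088, 5832, 6552, 7296, 8016, 8760]

def pvParseMonth (cell : String) : Option Int :=
  let s := PySem.Str.strip cell
  let head? : Option String :=
    if PySem.Str.isIn "/" s then
      PySem.List.pyGet? ((PySem.Str.split? s "/").getD []) 0
    else if PySem.Str.isIn "-" s then
      PySem.List.pyGet? ((PySem.Str.split? s "-").getD []) 1
    else none
  head?.bind PySem.Int.ofStr?

def extract_month_py_alt (row : List String) (hour_index : Int) : Int :=
  let m? := match row with
            | [] => none
            | cell :: _ => pvParseMonth cell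
  match m? with
  | some m => m
  | none => min ((PySem.List.bisectRight pvCumHours hour_index : Int) + 1) 12

-- ===== PRECONDITION & SPEC =====
def Spec_extract_month_py (row : List String) (hour_index : Int) (out : Int) : Prop := out = extract_month_py_alt row hour_index
instance (row : List String) (hour_index : Int) (out : Int) : Decidable (Spec_extract_month_py row hour_index out) := by unfold Spec_extract_month_py; infer_instance

-- ===== CLAIM (what is proved, stated in full; the proofs are below) =====
def Claim_equal_extract_month_py : Prop := ∀ (row : List String) (hour_index : Int), Dom_extract_month_py row hour_index → Spec_extract_month_py row hour_index (extract_month_py row hour_index)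

-- ===== LEMMAS AND PROOFS =====

-- The two fallbacks agree: A's linear cumulative scan equals B's clamped bisect_right + 1.
set_option maxHeartbeats 2000000 in
lemma fallback_eq (x : Int) :
    pvAFallback x = min ((PySem.List.bisectRight pvCumHours x : Int) + 1) 12 := by
  obtain ⟨h1, h2, h3⟩ := PySem.List.bisectRight_spec pvCumHours x (by decide)
  set k := PySem.List.bisectRight pvCumHours x with hk
  have f0 := h2 0 (by simp [pvCumHours]); have g0 := h3 0 (by simp [pvCumHours])
  have f1 := h2 1 (by simp [pvCumHours]); have g1 := h3 1 (by simp [pvCumHours])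
  have f2 := h2 2 (by simp [pvCumHours]); have g2 := h3 2 (by simp [pvCumHours])
  have f3 := h2 3 (by simp [pvCumHours]); have g3 := h3 3 (by simp [pvCumHours])
  have f4 := h2 4 (by simp [pvCumHours]); have g4 := h3 4 (by simp [pvCumHours])
  have f5 := h2 5 (by simp [pvCumHours]); have g5 := h3 5 (by simp [pvCumHours])
  have f6 := h2 6 (by simp [pvCumHours]); have g6 := h3 6 (by simp [pvCumHours])
  have f7 := h2 7 (by simp [pvCumHours]); have g7 := h3 7 (by simp [pvCumHours])
  have f8 := h2 8 (by simp [pvCumHours]); have g8 := h3 8 (by simp [pvCumHours])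
  have f9 := h2 9 (by simp [pvCumHours]); have g9 := h3 9 (by simp [pvCumHours])
  have f10 := h2 10 (by simp [pvCumHours]); have g10 := h3 10 (by simp [pvCumHours])
  have f11 := h2 11 (by simp [pvCumHours]); have g11 := h3 11 (by simp [pvCumHours])
  simp only [pvCumHours, List.getElem_cons_zero, List.getElem_cons_succ] at f0 f1 f2 f3 f4 f5 f6 f7 f8 f9 f10 f11 g0 g1 g2 g3 g4 g5 g6 g7 g8 g9 g10 g11
  norm_num [pvAFallback, pvALoop]
  split_ifs <;> omega

-- ===== VERDICT (by name: the statement is the Claim_ definition above) =====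
theorem extract_month_py_spec : Claim_equal_extract_month_py := by
  intro row hour_index _
  unfold Spec_extract_month_py
  match row with
  | [] =>
    simp only [extract_month_py, extract_month_py_alt]
    exact fallback_eq hour_index
  | cell :: rest =>
    simp only [extract_month_py, extract_month_py_alt, pvParseMonth]
    by_cases hs : PySem.Str.isIn "/" (PySem.Str.strip cell) = true
    · cases hp : PySem.List.pyGet? ((PySem.Str.split? (PySem.Str.strip cell) "/").getD []) 0 with
      | none =>
        simp only [hs, if_true, Option.bind_none]
        exact fallback_eq hour_index
      | some p =>
        cases ho : PySem.Int.ofStr? p with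
        | none =>
          simp only [hs, ho, if_true, Option.bind_some]
          exact fallback_eq hour_index
        | some v => simp only [hs, ho, if_true, Option.bind_some]
    · by_cases hd : PySem.Str.isIn "-" (PySem.Str.strip cell) = true
      · cases hp : PySem.List.pyGet? ((PySem.Str.split? (PySem.Str.strip cell) "-").getD []) 1 with
        | none =>
          simp only [hs, hd, Bool.false_eq_true, if_true, if_false, Option.bind_none]
          exact fallback_eq hour_index
        | some p =>
          cases ho : PySem.Int.ofStr? p with
          | none =>
            simp only [hs, hd, ho, Bool.false_eq_true, if_true, if_false, Option.bind_some]
            exact fallback_eq hour_index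
          | some v => simp only [hs, hd, ho, Bool.false_eq_true, if_true, if_false, Option.bind_some]
      · simp only [hs, hd, Bool.false_eq_true, if_false, Option.bind_none]
        exact fallback_eq hour_index
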